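-- pv_equiv track=rewrite | github.com/Lolopenza/DMS | math-engine/core/discrete_math/set_theory/relations.py | get_relation_matrix
-- ===== SOURCE A (Python) =====
-- def is_relation(relation, domain, codomain=None):
--     if codomain is None:
--         codomain = domain
--
--     if not isinstance(relation, set):
--         raise TypeError("Relation must be a set of pairs")
--     if not isinstance(domain, set):
--         raise TypeError("Domain must be a set")
--     if not isinstance(codomain, set):
--         raise TypeError("Codomain must be a set")
--
--     for pair in relation:
--         if not isinstance(pair, tuple) or len(pair) != 2:
--             raise ValueError(f"Relation contains non-pair element: {pair}")
--         if pair[0] not in domain: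
--             raise ValueError(f"Element {pair[0]} in relation pair {pair} is not in the domain {domain}")
--         if pair[1] not in codomain:
--             raise ValueError(f"Element {pair[1]} in relation pair {pair} is not in the codomain {codomain}")
--
--     return True
--
-- def get_relation_matrix(relation, domain):
--     if not is_relation(relation, domain):
--         return None
--
--     sorted_domain = sorted(list(domain))
--     n = len(sorted_domain)
--     matrix = [[0] * n for _ in range(n)]
--
--     element_to_index = {element: i for i, element in enumerate(sorted_domain)}
--
--     for a, b in relation:
--         if a in element_to_index and b in element_to_index:
--             row_idx = element_to_index[a]
--             col_idx = element_to_index[b]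
--             matrix[row_idx][col_idx] = 1
--
--     return matrix, sorted_domain
-- ===== SOURCE B (Python) =====
-- def is_relation(relation, domain, codomain=None):
--     if codomain is None:
--         codomain = domain
--
--     if not isinstance(relation, set):
--         raise TypeError("Relation must be a set of pairs")
--     if not isinstance(domain, set):
--         raise TypeError("Domain must be a set")
--     if not isinstance(codomain, set):
--         raise TypeError("Codomain must be a set")
--
--     for pair in relation:
--         if not isinstance(pair, tuple) or len(pair) != 2:
--             raise ValueError(f"Relation contains non-pair element: {pair}")
--         if pair[0] not in domain:
--             raise ValueError(f"Element {pair[0]} in relation pair {pair} is not in the domain {domain}")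
--         if pair[1] not in codomain:
--             raise ValueError(f"Element {pair[1]} in relation pair {pair} is not in the codomain {codomain}")
--
--     return True
--
--
-- def get_relation_matrix(relation, domain):
--     if not is_relation(relation, domain):
--         return None
--
--     sorted_domain = sorted(domain)
--     matrix = [[1 if (a, b) in relation else 0 for b in sorted_domain]
--               for a in sorted_domain]
--     return matrix, sorted_domain
-- ===== Notes on version B (the rewrite author's own statement) =====
-- stated objective: idiomatic
-- what changed: Replaces the zero-matrix + element-to-index dict + scatter over the relation with a direct double comprehension over sorted_domain that tests each ordered pair for membership in the relation set.
import Mathlib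
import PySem

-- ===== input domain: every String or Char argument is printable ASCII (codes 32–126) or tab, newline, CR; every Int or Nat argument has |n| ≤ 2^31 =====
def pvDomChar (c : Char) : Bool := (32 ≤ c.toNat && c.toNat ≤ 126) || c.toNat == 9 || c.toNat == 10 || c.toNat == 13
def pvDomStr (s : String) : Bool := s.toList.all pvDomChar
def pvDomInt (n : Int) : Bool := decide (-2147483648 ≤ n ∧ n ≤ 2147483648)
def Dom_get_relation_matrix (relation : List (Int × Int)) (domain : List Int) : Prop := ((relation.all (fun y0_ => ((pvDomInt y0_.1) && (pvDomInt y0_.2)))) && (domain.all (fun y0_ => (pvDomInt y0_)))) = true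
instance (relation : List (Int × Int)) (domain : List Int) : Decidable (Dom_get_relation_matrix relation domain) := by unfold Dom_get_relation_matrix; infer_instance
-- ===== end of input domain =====

-- ===== PORT A =====
-- B changes: the index-dict + scatter loop becomes a double comprehension testing pair
-- membership in the relation (idiomatic, not faster).
-- Port of A: is_relation either raises (excluded by Pre_) or returns True, so the main
-- path is ported; the matrix build is transliterated step for step.
def get_relation_matrix (relation : List (Int × Int)) (domain : List Int) : List (List Int) × List Int :=
  let sorted_domain := PySem.List.sorted domain (fun x => x) false
  let n := sorted_domain.length
  let matrix := List.replicate n (List.replicate n (0 : Int))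
  let element_to_index : PySem.Dict Int Int :=
    (PySem.List.enumerate sorted_domain 0).foldl (fun d p => d.insert p.2 p.1) PySem.Dict.empty
  let matrix := relation.foldl (fun m ab =>
    if element_to_index.contains ab.1 && element_to_index.contains ab.2 then
      let row_idx := (element_to_index.getD ab.1 0).toNat
      let col_idx := (element_to_index.getD ab.2 0).toNat
      m.set row_idx ((m.getD row_idx []).set col_idx 1)
    else m) matrix
  (matrix, sorted_domain)

-- ===== PORT B =====
def get_relation_matrix_alt (relation : List (Int × Int)) (domain : List Int) : List (List Int) × List Int :=
  let sorted_domain := PySem.List.sorted domain (fun x => x) false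
  let matrix := sorted_domain.map (fun a =>
    sorted_domain.map (fun b => if (a, b) ∈ relation then (1 : Int) else 0))
  (matrix, sorted_domain)

-- ===== PRECONDITION & SPEC =====
-- Pre_ excludes (i) inputs where a pair of the relation lies outside the domain, on which
-- A's is_relation raises ValueError, and (ii) a `domain` list with duplicate elements,
-- which is not a valid encoding of the Python set argument.
def Pre_get_relation_matrix (relation : List (Int × Int)) (domain : List Int) : Prop :=
  domain.Nodup ∧ ∀ p ∈ relation, p.1 ∈ domain ∧ p.2 ∈ domain
instance (relation : List (Int × Int)) (domain : List Int) : Decidable (Pre_get_relation_matrix relation domain) := by unfold Pre_get_relation_matrix; infer_instance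

def pvWitness_get_relation_matrix : (List (Int × Int)) × List Int := ([(1, 2), (2, 2)], [2, 1, 3])

def Spec_get_relation_matrix (relation : List (Int × Int)) (domain : List Int) (out : List (List Int) × List Int) : Prop := out = get_relation_matrix_alt relation domain
instance (relation : List (Int × Int)) (domain : List Int) (out : List (List Int) × List Int) : Decidable (Spec_get_relation_matrix relation domain out) := by unfold Spec_get_relation_matrix; infer_instance

-- ===== CLAIM (what is proved, stated in full; the proofs are below) =====
def Claim_equal_get_relation_matrix : Prop := ∀ (relation : List (Int × Int)) (domain : List Int), Dom_get_relation_matrix relation domain → Pre_get_relation_matrix relation domain → Spec_get_relation_matrix relation domain (get_relation_matrix relation domain)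

-- ===== LEMMAS AND PROOFS =====

-- the shape of B's matrix, over an arbitrary Bool predicate
def pvInd (s : List Int) (p : Int → Int → Bool) : List (List Int) :=
  s.map (fun a => s.map (fun b => if p a b then (1 : Int) else 0))

theorem pvInd_false (s : List Int) :
    List.replicate s.length (List.replicate s.length (0 : Int)) = pvInd s (fun _ _ => false) := by
  simp [pvInd]

-- A's index dict maps s[i] to i when s has no duplicates
theorem pvDict_getD (s : List Int) (hnd : s.Nodup) (i : Nat) (hi : i < s.length) :
    ((PySem.List.enumerate s 0).foldl (fun d p => d.insert p.2 p.1)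
      (PySem.Dict.empty : PySem.Dict Int Int)).getD s[i] 0 = (i : Int) := by
  have hkeys : ((PySem.List.enumerate s 0).foldl (fun d p => d.insert p.2 p.1)
      (PySem.Dict.empty : PySem.Dict Int Int)).keys.Nodup := by
    exact PySem.Dict.nodup_keys_foldl_insert_key _ (fun (p : Int × Int) => p.2)
      (fun d p => p.1) _ PySem.Dict.nodup_keys_empty
  have hitems : ((PySem.List.enumerate s 0).foldl (fun d p => d.insert p.2 p.1)
      (PySem.Dict.empty : PySem.Dict Int Int)).items
      = PySem.Dict.empty.items ++ (PySem.List.enumerate s 0).map (fun p => (p.2, p.1)) := by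
    apply PySem.Dict.items_foldl_insert_fresh _ (fun (p : Int × Int) => p.2) (fun p => p.1)
    · intro a _; simp [PySem.Dict.contains_empty]
    · rw [PySem.List.map_snd_enumerate]; exact hnd
  have hmem : (s[i], (i : Int)) ∈ ((PySem.List.enumerate s 0).foldl (fun d p => d.insert p.2 p.1)
      (PySem.Dict.empty : PySem.Dict Int Int)).items := by
    rw [hitems]
    refine List.mem_append_right _ ?_
    refine List.mem_map.mpr ⟨((i : Int), s[i]), ?_, rfl⟩
    exact (PySem.List.mem_enumerate_iff _ _ _).mpr ⟨i, hi, by simp⟩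
  exact PySem.Dict.getD_of_mem_items _ hmem hkeys 0

theorem pvDict_contains (s : List Int) (x : Int) :
    ((PySem.List.enumerate s 0).foldl (fun d p => d.insert p.2 p.1)
      (PySem.Dict.empty : PySem.Dict Int Int)).contains x = decide (x ∈ s) := by
  rw [PySem.Dict.contains_eq_decide_mem_keys]
  have : ((PySem.List.enumerate s 0).foldl (fun d p => d.insert p.2 p.1)
      (PySem.Dict.empty : PySem.Dict Int Int)).keys
      = PySem.Set.update PySem.Dict.empty.keys ((PySem.List.enumerate s 0).map (fun p => p.2)) :=
    PySem.Dict.keys_foldl_insert_key _ _ _ _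
  rw [this, PySem.List.map_snd_enumerate]
  simp [PySem.Dict.keys_empty, PySem.Set.mem_update]

-- setting entry (idxOf y) to 1 in a 0/1 row adds y to the predicate
theorem pvRow_set (s : List Int) (hnd : s.Nodup) (y : Int) (hy : y ∈ s) (q : Int → Bool) :
    (s.map (fun b => if q b then (1 : Int) else 0)).set (s.idxOf y) 1
      = s.map (fun b => if q b || b == y then (1 : Int) else 0) := by
  apply List.ext_getElem
  · simp
  · intro i h1 h2
    simp only [List.length_set, List.length_map] at h1
    by_cases hiy : i = s.idxOf y
    · subst hiy
      rw [List.getElem_set_self]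
      have : s[s.idxOf y] = y := List.getElem_idxOf (List.idxOf_lt_length_of_mem hy)
      simp [this]
    · rw [List.getElem_set_ne (by omega)]
      have hne : s[i] ≠ y := by
        intro he
        have h2 := List.Nodup.idxOf_getElem hnd i h1
        rw [he] at h2
        exact hiy h2.symm
      simp [hne]

-- one scatter step on the indicator matrix
theorem pvStep (s : List Int) (hnd : s.Nodup) (x y : Int) (hx : x ∈ s) (hy : y ∈ s)
    (p : Int → Int → Bool) :
    (pvInd s p).set (s.idxOf x) (((pvInd s p).getD (s.idxOf x) []).set (s.idxOf y) 1)
      = pvInd s (fun a b => p a b || (a == x && b == y)) := by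
  have hxlt : s.idxOf x < s.length := List.idxOf_lt_length_of_mem hx
  have hrow : (pvInd s p).getD (s.idxOf x) [] = s.map (fun b => if p x b then (1 : Int) else 0) := by
    have hlt : s.idxOf x < (pvInd s p).length := by simpa [pvInd] using hxlt
    rw [List.getD_eq_getElem _ _ hlt]
    simp [pvInd, List.getElem_idxOf hxlt]
  rw [hrow]
  apply List.ext_getElem
  · simp [pvInd]
  · intro i h1 h2
    simp only [pvInd, List.length_set, List.length_map] at h1
    by_cases hix : i = s.idxOf x
    · subst hix
      rw [List.getElem_set_self]
      have hsx : s[s.idxOf x] = x := List.getElem_idxOf hxlt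
      rw [pvRow_set s hnd y hy]
      simp [pvInd, hsx]
    · rw [List.getElem_set_ne (by omega)]
      have hne : s[i] ≠ x := by
        intro he
        have h2 := List.Nodup.idxOf_getElem hnd i h1
        rw [he] at h2
        exact hix h2.symm
      simp [pvInd, hne]

-- the whole scatter loop over the relation
theorem pvFold (s : List Int) (hnd : s.Nodup) (rel : List (Int × Int))
    (hrel : ∀ p ∈ rel, p.1 ∈ s ∧ p.2 ∈ s) (p : Int → Int → Bool) :
    rel.foldl (fun m ab =>
      if (((PySem.List.enumerate s 0).foldl (fun d q => d.insert q.2 q.1)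
            (PySem.Dict.empty : PySem.Dict Int Int)).contains ab.1
          && ((PySem.List.enumerate s 0).foldl (fun d q => d.insert q.2 q.1)
            (PySem.Dict.empty : PySem.Dict Int Int)).contains ab.2) then
        m.set (((PySem.List.enumerate s 0).foldl (fun d q => d.insert q.2 q.1)
            (PySem.Dict.empty : PySem.Dict Int Int)).getD ab.1 0).toNat
          ((m.getD (((PySem.List.enumerate s 0).foldl (fun d q => d.insert q.2 q.1)
            (PySem.Dict.empty : PySem.Dict Int Int)).getD ab.1 0).toNat []).set
            (((PySem.List.enumerate s 0).foldl (fun d q => d.insert q.2 q.1)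
            (PySem.Dict.empty : PySem.Dict Int Int)).getD ab.2 0).toNat 1)
      else m) (pvInd s p)
    = pvInd s (fun a b => p a b || decide ((a, b) ∈ rel)) := by
  induction rel generalizing p with
  | nil => simp
  | cons hd tl ih =>
    obtain ⟨hx, hy⟩ := hrel hd (by simp)
    rw [List.foldl_cons]
    have hc1 := pvDict_contains s hd.1
    have hc2 := pvDict_contains s hd.2
    have hg1 : (((PySem.List.enumerate s 0).foldl (fun d q => d.insert q.2 q.1)
        (PySem.Dict.empty : PySem.Dict Int Int)).getD hd.1 0).toNat = s.idxOf hd.1 := by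
      have hlt := List.idxOf_lt_length_of_mem hx
      have := pvDict_getD s hnd (s.idxOf hd.1) hlt
      rw [List.getElem_idxOf hlt] at this
      rw [this]; simp
    have hg2 : (((PySem.List.enumerate s 0).foldl (fun d q => d.insert q.2 q.1)
        (PySem.Dict.empty : PySem.Dict Int Int)).getD hd.2 0).toNat = s.idxOf hd.2 := by
      have hlt := List.idxOf_lt_length_of_mem hy
      have := pvDict_getD s hnd (s.idxOf hd.2) hlt
      rw [List.getElem_idxOf hlt] at this
      rw [this]; simp
    rw [hc1, hc2]
    simp only [hx, hy, decide_true, Bool.and_self, if_true, hg1, hg2]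
    rw [pvStep s hnd hd.1 hd.2 hx hy p]
    rw [ih (fun q hq => hrel q (by simp [hq]))]
    congr 1
    funext a b
    by_cases hab : (a, b) = hd
    · simp [← hab]
    · have : ((a, b) ∈ hd :: tl) ↔ ((a, b) ∈ tl) := by simp [hab]
      have habx : ¬(a = hd.1 ∧ b = hd.2) := by
        intro ⟨h1, h2⟩; exact hab (by cases hd; simp_all)
      simp only [this]
      rcases not_and_or.mp habx with h | h <;>
        simp [beq_eq_false_iff_ne.mpr h]

-- ===== VERDICT (by name: the statement is the Claim_ definition above) =====
theorem get_relation_matrix_spec : Claim_equal_get_relation_matrix := by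
  intro relation domain _ hpre
  obtain ⟨hnd, hrel⟩ := hpre
  unfold Spec_get_relation_matrix
  show (_, _) = (_, _)
  dsimp only
  have hperm : (PySem.List.sorted domain (fun x => x) false).Perm domain :=
    PySem.List.sorted_perm domain (fun x => x) false
  have hsnd : (PySem.List.sorted domain (fun x => x) false).Nodup := hperm.nodup_iff.mpr hnd
  have hrel' : ∀ p ∈ relation, p.1 ∈ PySem.List.sorted domain (fun x => x) false
      ∧ p.2 ∈ PySem.List.sorted domain (fun x => x) false := by
    intro p hp
    obtain ⟨h1, h2⟩ := hrel p hp
    exact ⟨hperm.mem_iff.mpr h1, hperm.mem_iff.mpr h2⟩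
  rw [pvInd_false (PySem.List.sorted domain (fun x => x) false)]
  rw [pvFold _ hsnd relation hrel' _]
  simp [pvInd]
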